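-- pv_equiv track=rewrite | github.com/Markach/Semenar5_DZ | Task4.py | ascending_sequence
-- ===== SOURCE A (Python) =====
-- def ascending_sequence(array):
--     final_array = []
--     temporery_array = []
--     j = 1
--
--     while j < len(array):
--         i = j
--         copy_array = array[:]
--         while i < len(copy_array) - 1:
--             if copy_array[i] < copy_array[i+1]:
--                 temporery_array.append(copy_array[i])
--                 i += 1
--             else:
--                 copy_array.pop(i+1)
--         j += 1
--         if len(final_array) < len(temporery_array):
--             final_array = temporery_array
--         temporery_array = []
--     if array[-1] > final_array[-1]:
--         final_array.append(array[-1])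
--     if array[0] < final_array[0]:
--         final_array.insert(0, array[0])
--
--     return final_array
-- ===== SOURCE B (Python) =====
-- def ascending_sequence(array):
--     # Same greedy "next strictly greater" chains, but each chain is built by a
--     # single forward scan tracking the current value (no list copying / pop()).
--     def chain(j):
--         cur = array[j]
--         out = []
--         for x in array[j + 1:]:
--             if cur < x:
--                 out.append(cur)
--                 cur = x
--         return out
--     final = max((chain(j) for j in range(1, len(array))), key=len, default=[])
--     if array[-1] > final[-1]:
--         final = final + [array[-1]]
--     if array[0] < final[0]:
--         final = [array[0]] + final
--     return final
-- ===== Notes on version B (the rewrite author's own statement) =====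
-- stated objective: faster
-- what changed: A rebuilds a full copy of the array for every start index and repeatedly pops elements out of it (each pop an O(n) shift) to extract the greedy ascending chain; B builds each chain with a single forward scan that just tracks the current value (no copying, no in-place deletion) and picks the first longest chain with max(key=len).
import Mathlib
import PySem

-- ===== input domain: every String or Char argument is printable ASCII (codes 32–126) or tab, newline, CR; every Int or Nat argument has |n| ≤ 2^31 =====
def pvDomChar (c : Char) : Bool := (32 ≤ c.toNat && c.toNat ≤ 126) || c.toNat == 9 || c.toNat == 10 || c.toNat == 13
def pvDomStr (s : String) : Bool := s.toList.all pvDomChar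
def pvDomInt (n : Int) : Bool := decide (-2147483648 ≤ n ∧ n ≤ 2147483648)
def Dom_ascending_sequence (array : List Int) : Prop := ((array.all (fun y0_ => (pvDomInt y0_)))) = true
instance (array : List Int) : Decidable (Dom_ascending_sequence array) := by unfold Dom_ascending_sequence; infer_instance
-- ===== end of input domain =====

-- B replaces A's copy-and-pop greedy chain builder with a single forward scan per start
-- that tracks the current value (no list copying or in-place deletion), and picks the
-- first longest chain with max(..., key=len, default=[]).

-- ===== PORT A =====
-- inner while loop of A: state (copy_array, i, temporery_array); pop(i+1) = eraseIdx (i+1);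
-- the guard i < len(copy)-1 is i+1 < copy.length, so indices i, i+1 are in range and getD is exact.
def pvInnerA (copy : List Int) (i : Nat) (temp : List Int) : List Int :=
  if h : i + 1 < copy.length then
    if copy.getD i 0 < copy.getD (i + 1) 0 then
      pvInnerA copy (i + 1) (temp ++ [copy.getD i 0])
    else
      pvInnerA (copy.eraseIdx (i + 1)) i temp
  else temp
termination_by (copy.length - i, copy.length)
decreasing_by
  · exact Prod.Lex.left _ _ (by omega)
  · have hlen : (copy.eraseIdx (i + 1)).length = copy.length - 1 :=
      List.length_eraseIdx_of_lt (by omega)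
    exact Prod.Lex.left _ _ (by omega)

-- outer while loop of A (j from 1; temporery_array starts empty each round;
-- copy_array = array[:] is a fresh copy, so each round reads the original array)
def pvOuterA (array : List Int) (j : Nat) (final : List Int) : List Int :=
  if j < array.length then
    pvOuterA array (j + 1)
      (if final.length < (pvInnerA array j []).length then pvInnerA array j [] else final)
  else final
termination_by array.length - j

-- the two tail fix-ups of A: final.append(array[-1]) / final.insert(0, array[0]).
-- array[-1]/final[-1]/array[0]/final[0]: exact under Pre_ (both lists nonempty there);
-- where a list is empty Python A raises IndexError, which Pre_ excludes.
def pvTailA (array final : List Int) : List Int :=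
  if array.getLastD 0 > final.getLastD 0 then final ++ [array.getLastD 0] else final
def pvHeadA (array final : List Int) : List Int :=
  if array.headD 0 < final.headD 0 then array.headD 0 :: final else final

def ascending_sequence (array : List Int) : List Int :=
  pvHeadA array (pvTailA array (pvOuterA array 1 []))

-- ===== PORT B =====
-- Source B's inner scan: cur := current value, emit cur and advance on each strictly greater element
def pvChainB : Int → List Int → List Int
  | _, [] => []
  | cur, x :: xs => if cur < x then cur :: pvChainB x xs else pvChainB cur xs

-- Source B's chain(j): cur = array[j]; scan array[j+1:]  (j in range, so getD is exact)
def pvChainAt (array : List Int) (j : Nat) : List Int :=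
  pvChainB (array.getD j 0) (array.drop (j + 1))

-- Source B's tail fix-ups (same two lines as in A's source)
def pvTailB (array final : List Int) : List Int :=
  if array.getLastD 0 > final.getLastD 0 then final ++ [array.getLastD 0] else final
def pvHeadB (array final : List Int) : List Int :=
  if array.headD 0 < final.headD 0 then array.headD 0 :: final else final

-- max(..., key=len, default=[]) is PySem.List.maxD (first longest wins, as in Python)
def ascending_sequence_alt (array : List Int) : List Int :=
  pvHeadB array (pvTailB array
    (PySem.List.maxD
      ((PySem.List.pyRange 1 (array.length : Int) 1).map (fun j => pvChainAt array j.toNat))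
      (fun c => ((c.length : Int))) []))

-- ===== PRECONDITION & SPEC =====
-- Pre_ excludes exactly the inputs on which A raises IndexError at the tail fix-ups
-- (array or final_array empty): those where no position i ≥ 1 has a later, strictly
-- greater element.  B raises the same IndexError there.
def Pre_ascending_sequence (array : List Int) : Prop :=
  ∃ i < array.length, ∃ k < array.length, 1 ≤ i ∧ i < k ∧ array.getD i 0 < array.getD k 0
instance (array : List Int) : Decidable (Pre_ascending_sequence array) := by
  unfold Pre_ascending_sequence; infer_instance
def pvWitness_ascending_sequence : List Int := [0, 1, 2]

def Spec_ascending_sequence (array : List Int) (out : List Int) : Prop := out = ascending_sequence_alt array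
instance (array : List Int) (out : List Int) : Decidable (Spec_ascending_sequence array out) := by unfold Spec_ascending_sequence; infer_instance

-- ===== CLAIM (what is proved, stated in full; the proofs are below) =====
def Claim_equal_ascending_sequence : Prop := ∀ (array : List Int), Dom_ascending_sequence array → Pre_ascending_sequence array → Spec_ascending_sequence array (ascending_sequence array)

-- ===== LEMMAS AND PROOFS =====

-- A's copy-and-pop inner loop computes B's scan over the suffix.
theorem pvInnerA_eq (copy : List Int) (i : Nat) (temp : List Int) :
    pvInnerA copy i temp = temp ++ pvChainB (copy.getD i 0) (copy.drop (i + 1)) := by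
  fun_induction pvInnerA copy i temp with
  | case1 copy i temp h hlt ih =>
    have hij : i < copy.length := by omega
    rw [ih, List.drop_eq_getElem_cons h, List.append_assoc]
    rw [List.getD_eq_getElem copy 0 hij, List.getD_eq_getElem copy 0 h] at hlt ⊢
    simp [pvChainB, hlt]
  | case2 copy i temp h hlt ih =>
    have hij : i < copy.length := by omega
    have htl : (List.take (i + 1) copy).length = i + 1 := by
      simp [List.length_take]; omega
    have herase := List.eraseIdx_eq_take_drop_succ copy (i + 1)
    have hdrop : (copy.eraseIdx (i + 1)).drop (i + 1) = copy.drop (i + 1 + 1) := by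
      rw [herase, List.drop_append_of_le_length (by rw [htl]),
        List.drop_eq_nil_of_le (by rw [htl]), List.nil_append]
    have hget : (copy.eraseIdx (i + 1)).getD i 0 = copy.getD i 0 := by
      rw [herase, List.getD, List.getD, List.getElem?_append_left (by rw [htl]; omega),
        List.getElem?_take_of_lt (by omega)]
    rw [ih, hdrop, hget, List.drop_eq_getElem_cons h]
    rw [List.getD_eq_getElem copy 0 hij, List.getD_eq_getElem copy 0 h] at hlt
    rw [List.getD_eq_getElem copy 0 hij]
    simp [pvChainB, hlt]
  | case3 copy i temp h =>
    rw [List.drop_eq_nil_of_le (by omega)]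
    simp [pvChainB]

-- A's outer loop is the fold "keep the strictly longer chain" over B's list of chains.
theorem pvOuterA_eq (array : List Int) (j : Nat) (final : List Int) :
    pvOuterA array j final =
      List.foldl (fun f t => if f.length < t.length then t else f) final
        ((PySem.List.pyRange (j : Int) (array.length : Int) 1).map
          (fun i => pvChainAt array i.toNat)) := by
  fun_induction pvOuterA array j final with
  | case1 j final h ih =>
    rw [PySem.List.pyRange_one_cons (by exact_mod_cast h), List.map_cons, List.foldl_cons]
    simp only [pvInnerA_eq, List.nil_append, dite_eq_ite] at ih ⊢
    simp only [Int.toNat_natCast, pvChainAt]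
    rw [show ((j : Int) + 1) = (((j + 1 : Nat) : Int)) by push_cast; ring]
    exact ih
  | case2 j final h =>
    rw [PySem.List.pyRange_one_eq_nil (by exact_mod_cast Nat.le_of_not_lt h)]
    simp

-- A's outer loop started at j = 1 (Nat.cast_one removes the coercion of the literal)
theorem pvOuterA_one (array : List Int) :
    pvOuterA array 1 [] =
      List.foldl (fun f t => if f.length < t.length then t else f) []
        ((PySem.List.pyRange 1 (array.length : Int) 1).map
          (fun i => pvChainAt array i.toNat)) := by
  have h := pvOuterA_eq array 1 []
  simpa only [Nat.cast_one] using h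

-- Python's max over a nonempty list, keyed by length, is the same fold started at the head.
theorem pvMax?_cons_eq (cs : List (List Int)) : ∀ (m : List Int),
    PySem.List.max? (m :: cs) (fun c => ((c.length : Int))) =
      some (List.foldl (fun f t => if f.length < t.length then t else f) m cs) := by
  induction cs with
  | nil => intro m; rfl
  | cons c cs ih =>
    intro m
    have h1 : PySem.List.max? (m :: c :: cs) (fun c => ((c.length : Int))) =
        PySem.List.max? ((if m.length < c.length then c else m) :: cs)
          (fun c => ((c.length : Int))) := by
      simp only [PySem.List.max?, List.foldl_cons]
      by_cases hm : m.length < c.length <;> simp [hm]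
    rw [h1, ih, List.foldl_cons]

-- … hence maxD with default [] equals A's fold started at [] (a zero-length chain is []).
theorem pvMaxD_eq (cs : List (List Int)) :
    PySem.List.maxD cs (fun c => ((c.length : Int))) [] =
      List.foldl (fun f t => if f.length < t.length then t else f) [] cs := by
  cases cs with
  | nil => rfl
  | cons c cs =>
    have hc : (if ([] : List Int).length < c.length then c else []) = c := by
      cases c <;> simp
    rw [PySem.List.maxD, pvMax?_cons_eq, Option.getD_some, List.foldl_cons, hc]

-- ===== VERDICT (by name: the statement is the Claim_ definition above) =====
theorem ascending_sequence_spec : Claim_equal_ascending_sequence := by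
  intro array _ _
  show ascending_sequence array = ascending_sequence_alt array
  rw [ascending_sequence, ascending_sequence_alt, pvMaxD_eq, ← pvOuterA_one]
  rfl
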